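-- pv_equiv track=rewrite | github.com/JimmyPaolini/TryTune | src/trytune_python/tunings.py | tuneEqual
-- ===== SOURCE A (Python) =====
-- def tuneEqual(tune):
--     tuned = []
--     for i in range(12):
--         tuned.append((i,100))
--         for tup in tune:
--             if tup[0] == i and abs(tup[1]) < abs(tuned[i][1]):
--                 tuned[i] = (i, tup[1])
--     return tuned
-- ===== SOURCE B (Python) =====
-- def tuneEqual(tune):
--     best = {}
--     for tup in tune:
--         if tup[0] in range(12) and abs(tup[1]) < abs(best.get(tup[0], 100)):
--             best[tup[0]] = tup[1]
--     return [(i, best.get(i, 100)) for i in range(12)]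
-- ===== Notes on version B (the rewrite author's own statement) =====
-- stated objective: simpler
-- what changed: Replaces A's 12 outer iterations each rescanning the whole tune list (with in-place list updates) by a single pass over tune building a dict of per-semitone best deviations, then a table read-out over range(12).
import Mathlib
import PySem

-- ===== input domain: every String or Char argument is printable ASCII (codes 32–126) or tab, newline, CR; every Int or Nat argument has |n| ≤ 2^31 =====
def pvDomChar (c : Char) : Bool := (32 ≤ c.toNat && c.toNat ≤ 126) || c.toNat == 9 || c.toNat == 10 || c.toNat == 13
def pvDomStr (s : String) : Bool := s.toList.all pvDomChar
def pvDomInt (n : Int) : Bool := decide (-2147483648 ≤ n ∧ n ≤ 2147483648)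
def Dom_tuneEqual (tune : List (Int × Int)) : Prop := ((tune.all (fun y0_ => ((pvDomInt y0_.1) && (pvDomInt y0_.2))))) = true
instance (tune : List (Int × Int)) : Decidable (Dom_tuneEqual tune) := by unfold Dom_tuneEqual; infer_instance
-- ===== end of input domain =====

-- B replaces A's 12 × n nested rescans by one pass over `tune` into a dict of per-semitone
-- best deviations plus a table read-out (objective: simpler, O(n) instead of O(12·n)).

-- ===== PORT A =====
-- literal transliteration of A's nested loops; `tuned[i]` read/write: i is the int from
-- range(12), always a valid non-negative index (list has length i+1 there), so
-- pyGetD / set i.toNat are exact.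
def tuneEqual (tune : List (Int × Int)) : List (Int × Int) :=
  (PySem.List.pyRange 0 12 1).foldl (fun tuned i =>
    let tuned := tuned ++ [(i, 100)]
    tune.foldl (fun tuned tup =>
      if tup.1 = i ∧ |tup.2| < |(PySem.List.pyGetD tuned i ((0 : Int), (0 : Int))).2| then
        tuned.set i.toNat (i, tup.2)
      else tuned) tuned) []

-- ===== PORT B =====
-- `tup[0] in range(12)` on ints is exactly 0 ≤ tup.1 ∧ tup.1 < 12
def tuneEqual_alt (tune : List (Int × Int)) : List (Int × Int) :=
  let best := tune.foldl (fun (best : PySem.Dict Int Int) tup =>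
    if 0 ≤ tup.1 ∧ tup.1 < 12 ∧ |tup.2| < |best.getD tup.1 100| then
      best.insert tup.1 tup.2
    else best) PySem.Dict.empty
  (PySem.List.pyRange 0 12 1).map (fun i => (i, best.getD i 100))

-- ===== PRECONDITION & SPEC =====
def Spec_tuneEqual (tune : List (Int × Int)) (out : List (Int × Int)) : Prop := out = tuneEqual_alt tune
instance (tune : List (Int × Int)) (out : List (Int × Int)) : Decidable (Spec_tuneEqual tune out) := by unfold Spec_tuneEqual; infer_instance

-- ===== CLAIM (what is proved, stated in full; the proofs are below) =====
def Claim_equal_tuneEqual : Prop := ∀ (tune : List (Int × Int)), Dom_tuneEqual tune → Spec_tuneEqual tune (tuneEqual tune)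

-- ===== LEMMAS AND PROOFS =====

-- the common scalar content of both loops: best (smallest-|·|, strict, first wins) deviation
-- for semitone i among `tune`, starting from v
def updMin (i : Int) (tune : List (Int × Int)) (v : Int) : Int :=
  tune.foldl (fun v tup => if tup.1 = i ∧ |tup.2| < |v| then tup.2 else v) v

-- A's inner loop only touches slot i (= the last slot) of `tuned`
lemma innerA (tune : List (Int × Int)) :
    ∀ (pre : List (Int × Int)) (i v : Int), pre.length = i.toNat → 0 ≤ i →
    tune.foldl (fun tuned tup =>
      if tup.1 = i ∧ |tup.2| < |(PySem.List.pyGetD tuned i ((0 : Int), (0 : Int))).2| then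
        tuned.set i.toNat (i, tup.2)
      else tuned) (pre ++ [(i, v)]) = pre ++ [(i, updMin i tune v)] := by
  induction tune with
  | nil => intro pre i v h hi; simp [updMin]
  | cons tup rest ih =>
    intro pre i v h hi
    have hget : PySem.List.pyGetD (pre ++ [(i, v)]) i ((0 : Int), (0 : Int)) = (i, v) := by
      rw [PySem.List.pyGetD_of_nonneg _ _ hi]
      simp [← h]
    have hset : (pre ++ [(i, v)]).set i.toNat (i, tup.2) = pre ++ [(i, tup.2)] := by
      rw [← h]; simp
    simp only [List.foldl_cons, hget, updMin]
    by_cases hc : tup.1 = i ∧ |tup.2| < |v|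
    · rw [if_pos hc, hset, if_pos hc]; exact ih pre i tup.2 h hi
    · rw [if_neg hc, if_neg hc]; exact ih pre i v h hi

-- B's dict fold, read at one in-range key i, is the scalar fold
lemma dictB (tune : List (Int × Int)) :
    ∀ (d : PySem.Dict Int Int) (i : Int), 0 ≤ i → i < 12 →
    (tune.foldl (fun (best : PySem.Dict Int Int) tup =>
      if 0 ≤ tup.1 ∧ tup.1 < 12 ∧ |tup.2| < |best.getD tup.1 100| then
        best.insert tup.1 tup.2
      else best) d).getD i 100 = updMin i tune (d.getD i 100) := by
  induction tune with
  | nil => intro d i _ _; simp [updMin]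
  | cons tup rest ih =>
    intro d i h0 h12
    simp only [List.foldl_cons, updMin] at *
    by_cases h1 : tup.1 = i
    · subst h1
      by_cases hlt : |tup.2| < |d.getD tup.1 100|
      · rw [if_pos ⟨h0, h12, hlt⟩, if_pos ⟨rfl, hlt⟩, ih _ _ h0 h12,
          PySem.Dict.getD_insert_self]
      · rw [if_neg (by tauto), if_neg (by tauto)]; exact ih _ _ h0 h12
    · by_cases hc : 0 ≤ tup.1 ∧ tup.1 < 12 ∧ |tup.2| < |d.getD tup.1 100|
      · rw [if_pos hc, if_neg (by tauto), ih _ _ h0 h12,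
          PySem.Dict.getD_insert_of_ne _ _ _ (by exact fun he => h1 he.symm)]
      · rw [if_neg hc, if_neg (by tauto)]; exact ih _ _ h0 h12

-- A's outer loop builds the table of updMin values
lemma outerA (tune : List (Int × Int)) : ∀ (m : Nat), m ≤ 12 →
    (PySem.List.pyRange 0 m 1).foldl (fun tuned i =>
      let tuned := tuned ++ [(i, 100)]
      tune.foldl (fun tuned tup =>
        if tup.1 = i ∧ |tup.2| < |(PySem.List.pyGetD tuned i ((0 : Int), (0 : Int))).2| then
          tuned.set i.toNat (i, tup.2)
        else tuned) tuned) []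
    = (PySem.List.pyRange 0 m 1).map (fun i => (i, updMin i tune 100)) := by
  intro m
  induction m with
  | zero => intro _; simp [PySem.List.pyRange_one_eq_nil]
  | succ k ih =>
    intro hm
    have hsplit : PySem.List.pyRange 0 (k + 1 : Nat) 1
        = PySem.List.pyRange 0 (k : Nat) 1 ++ [(k : Int)] := by
      have := PySem.List.pyRange_one_succ_right (a := 0) (b := (k : Int)) (by positivity)
      simpa using this
    rw [hsplit, List.foldl_append, List.map_append, ih (by omega), List.foldl_cons,
      List.foldl_nil]
    have hlen : ((PySem.List.pyRange 0 (k : Nat) 1).map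
        (fun i => (i, updMin i tune 100))).length = ((k : Int)).toNat := by
      simp [PySem.List.length_pyRange_one]
    simpa using innerA tune _ (k : Int) 100 hlen (by positivity)

-- ===== VERDICT (by name: the statement is the Claim_ definition above) =====
theorem tuneEqual_spec : Claim_equal_tuneEqual := by
  intro tune _
  show tuneEqual tune = tuneEqual_alt tune
  unfold tuneEqual tuneEqual_alt
  have hA := outerA tune 12 le_rfl
  norm_num at hA
  rw [hA]
  refine List.map_congr_left (fun i hi => ?_)
  have hb := (PySem.List.mem_pyRange_one).1 hi
  rw [dictB tune PySem.Dict.empty i hb.1 hb.2]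
  simp [PySem.Dict.empty, PySem.Dict.getD, PySem.Dict.get?]
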